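-- pv_equiv track=rewrite | github.com/kage3175/Bioinfo_2022 | Mission5_temp.py | make_product
-- ===== SOURCE A (Python) =====
-- from itertools import product
--
-- def make_product(base, num_product):
--     temparr=[]
--     production=product(base,repeat=num_product)
--     for tup in production:
--         temp_str=''
--         for i in range(num_product):
--             temp_str=temp_str + tup[i]
--         #End of for body for i
--         temparr.append(temp_str)
--     #End of for body for tup
--     return temparr
-- ===== SOURCE B (Python) =====
-- def make_product(base, num_product):
--     if num_product < 0:
--         raise ValueError('repeat argument cannot be negative')
--     base = tuple(base)
--     result = ['']
--     for _ in range(num_product):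
--         result = [prefix + c for prefix in result for c in base]
--     return result
-- ===== Notes on version B (the rewrite author's own statement) =====
-- stated objective: alternative
-- what changed: Replaces itertools.product over tuples plus an inner character-by-character join loop with an iterative list-comprehension build that extends every partial string by one base element per pass, so no tuples are materialised and no per-tuple join loop runs.
import Mathlib
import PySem

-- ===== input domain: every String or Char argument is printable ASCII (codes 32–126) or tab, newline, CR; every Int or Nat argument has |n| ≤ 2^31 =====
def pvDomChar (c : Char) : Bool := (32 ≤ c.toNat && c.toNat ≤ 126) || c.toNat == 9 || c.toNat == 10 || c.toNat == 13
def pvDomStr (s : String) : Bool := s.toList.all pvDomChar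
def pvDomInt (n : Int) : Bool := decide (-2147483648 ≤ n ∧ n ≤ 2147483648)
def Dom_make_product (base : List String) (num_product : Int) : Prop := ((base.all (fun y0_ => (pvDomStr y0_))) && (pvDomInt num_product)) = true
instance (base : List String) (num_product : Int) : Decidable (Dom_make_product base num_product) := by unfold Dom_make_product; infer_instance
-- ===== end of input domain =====

-- B replaces itertools.product + per-tuple join loop by growing the list of partial
-- strings one position per pass (objective: alternative — no tuples, no inner join loop).

-- ===== PORT A =====
-- itertools.product(base, repeat=n), as its documented expansion:
-- result = [[]]; for each of the n pools: result = [x+[y] for x in result for y in pool]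
def pvProdRep (base : List String) (n : Nat) : List (List String) :=
  (List.range n).foldl
    (fun production _ => production.flatMap (fun t => base.map (fun y => t ++ [y]))) [[]]

-- the inner loop: for i in range(num_product): temp_str = temp_str + tup[i]
def pvJoinTup (tup : List String) (num_product : Int) : String :=
  (PySem.List.pyRange 0 num_product 1).foldl
    (fun temp_str i => temp_str ++ PySem.List.pyGetD tup i "") ""

def make_product (base : List String) (num_product : Int) : List String :=
  (pvProdRep base num_product.toNat).foldl
    (fun temparr tup => temparr ++ [pvJoinTup tup num_product]) []

-- ===== PORT B =====
-- (Source B raises ValueError on num_product < 0, just like A; those inputs are outside Pre_)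
def make_product_alt (base : List String) (num_product : Int) : List String :=
  (List.range num_product.toNat).foldl
    (fun result _ => result.flatMap (fun p => base.map (fun c => p ++ c))) [""]

-- ===== PRECONDITION & SPEC =====
-- Both A and B raise ValueError for a negative repeat count, so Pre_ requires 0 ≤ num_product.
def Pre_make_product (base : List String) (num_product : Int) : Prop := 0 ≤ num_product
instance (base : List String) (num_product : Int) : Decidable (Pre_make_product base num_product) := by unfold Pre_make_product; infer_instance
def pvWitness_make_product : List String × Int := (["a", "b"], 2)

def Spec_make_product (base : List String) (num_product : Int) (out : List String) : Prop := out = make_product_alt base num_product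
instance (base : List String) (num_product : Int) (out : List String) : Decidable (Spec_make_product base num_product out) := by unfold Spec_make_product; infer_instance

-- ===== CLAIM (what is proved, stated in full; the proofs are below) =====
def Claim_equal_make_product : Prop := ∀ (base : List String) (num_product : Int), Dom_make_product base num_product → Pre_make_product base num_product → Spec_make_product base num_product (make_product base num_product)

-- ===== LEMMAS AND PROOFS =====

theorem pvProdRep_succ (base : List String) (n : Nat) :
    pvProdRep base (n + 1)
      = (pvProdRep base n).flatMap (fun t => base.map (fun y => t ++ [y])) := by
  unfold pvProdRep
  rw [List.range_succ, List.foldl_append]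
  rfl

-- every tuple produced by product(base, repeat=n) has length n
theorem pvProdRep_length {base : List String} {n : Nat} {t : List String}
    (h : t ∈ pvProdRep base n) : t.length = n := by
  induction n generalizing t with
  | zero => simp [pvProdRep] at h; simp [h]
  | succ n ih =>
      rw [pvProdRep_succ] at h
      simp only [List.mem_flatMap, List.mem_map] at h
      obtain ⟨t', ht', y, -, rfl⟩ := h
      simp [ih ht']

-- the inner join loop, on a tuple of the right length, concatenates the tuple
theorem pvJoinTup_eq (tup : List String) :
    pvJoinTup tup (tup.length : Int) = tup.foldl (· ++ ·) "" := by
  unfold pvJoinTup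
  exact PySem.List.foldl_pyRange_zero_pyGetD' tup "" (· ++ ·) ""

-- joining is a homomorphism from B's string-extension pass to A's tuple-extension pass
theorem pvConcat_step (base : List String) (L : List (List String)) :
    (L.flatMap (fun t => base.map (fun y => t ++ [y]))).map (fun t => t.foldl (· ++ ·) "")
      = (L.map (fun t => t.foldl (· ++ ·) "")).flatMap
          (fun p => base.map (fun c => p ++ c)) := by
  simp only [List.map_flatMap, List.flatMap_map, List.map_map]
  refine List.flatMap_congr (fun t _ => ?_)
  refine List.map_congr_left (fun y _ => ?_)
  simp [Function.comp, List.foldl_append]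

theorem pvProdRep_map_concat (base : List String) (n : Nat) :
    (pvProdRep base n).map (fun t => t.foldl (· ++ ·) "")
      = (List.range n).foldl
          (fun result _ => result.flatMap (fun p => base.map (fun c => p ++ c))) [""] := by
  induction n with
  | zero => simp [pvProdRep]
  | succ n ih =>
      rw [pvProdRep_succ, pvConcat_step, ih, List.range_succ, List.foldl_append]
      rfl

-- ===== VERDICT (by name: the statement is the Claim_ definition above) =====
theorem make_product_spec : Claim_equal_make_product := by
  intro base num_product _ hpre
  unfold Spec_make_product make_product make_product_alt
  rw [PySem.List.foldl_append_singleton_eq_map, List.nil_append, ← pvProdRep_map_concat]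
  refine List.map_congr_left (fun t ht => ?_)
  have hlen : t.length = num_product.toNat := pvProdRep_length ht
  have hcast : (num_product : Int) = (t.length : Int) := by
    rw [hlen]; exact (Int.toNat_of_nonneg hpre).symm
  rw [hcast, pvJoinTup_eq]
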